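-- pv_equiv track=rewrite | github.com/goyal-chintan/project-lumos | feature/extraction/properties_extractor_service.py | _needs_normalization
-- ===== SOURCE A (Python) =====
-- from typing import Dict, List, Any
--
-- def _needs_normalization(values: List[str]) -> bool:
--     """Check if values need normalization"""
--     if len(values) < 2:
--         return False
--
--     # Check for case variations
--     lower_values = [v.lower() for v in values]
--     if len(set(lower_values)) < len(set(values)):
--         return True
--
--     # Check for whitespace variations
--     stripped_values = [v.strip() for v in values]
--     if len(set(stripped_values)) < len(set(values)):
--         return True
--
--     return False
-- ===== SOURCE B (Python) =====
-- from typing import Dict, List, Any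
--
-- def _needs_normalization(values: List[str]) -> bool:
--     """Check if values need normalization"""
--     if len(values) < 2:
--         return False
--     seen_lower = set()
--     seen_stripped = set()
--     for v in dict.fromkeys(values):  # distinct values, first-occurrence order
--         low = v.lower()
--         stripped = v.strip()
--         if low in seen_lower or stripped in seen_stripped:
--             return True
--         seen_lower.add(low)
--         seen_stripped.add(stripped)
--     return False
-- ===== Notes on version B (the rewrite author's own statement) =====
-- stated objective: alternative
-- what changed: Replaces A's build-three-lists-and-compare-set-cardinalities strategy by a single early-exiting pass over the distinct values that detects a lower()/strip() collision incrementally with two seen-sets.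
import Mathlib
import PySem

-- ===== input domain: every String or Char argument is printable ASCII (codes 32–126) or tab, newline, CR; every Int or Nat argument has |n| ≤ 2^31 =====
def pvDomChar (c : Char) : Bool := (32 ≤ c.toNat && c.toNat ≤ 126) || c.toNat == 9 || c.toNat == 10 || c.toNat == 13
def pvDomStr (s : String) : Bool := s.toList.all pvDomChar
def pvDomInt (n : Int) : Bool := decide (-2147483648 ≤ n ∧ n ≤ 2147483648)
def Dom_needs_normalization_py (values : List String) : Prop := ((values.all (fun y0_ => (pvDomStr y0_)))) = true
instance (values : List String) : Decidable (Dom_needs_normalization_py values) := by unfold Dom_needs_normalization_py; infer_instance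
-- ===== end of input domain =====

-- B replaces A's compare-set-cardinalities strategy by one early-exiting pass over the
-- distinct values that detects a lower()/strip() collision with two seen-sets (objective: alternative).

-- ===== PORT A =====
def needs_normalization_py (values : List String) : Bool :=
  if values.length < 2 then false
  else
    let lower_values := values.map PySem.Str.lower
    if PySem.Set.len (PySem.Set.ofList lower_values) < PySem.Set.len (PySem.Set.ofList values) then
      true
    else
      let stripped_values := values.map PySem.Str.strip
      if PySem.Set.len (PySem.Set.ofList stripped_values) < PySem.Set.len (PySem.Set.ofList values) then
        true
      else
        false

-- ===== PORT B =====
-- the loop 'for v in dict.fromkeys(values)' with the two seen-sets and early return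
def nnLoop : List String → PySem.Set String → PySem.Set String → Bool
  | [], _, _ => false
  | v :: rest, seenL, seenS =>
    let low := PySem.Str.lower v
    let stripped := PySem.Str.strip v
    if PySem.Set.contains seenL low || PySem.Set.contains seenS stripped then true
    else nnLoop rest (PySem.Set.add seenL low) (PySem.Set.add seenS stripped)

def needs_normalization_py_alt (values : List String) : Bool :=
  if values.length < 2 then false
  else nnLoop (PySem.List.dedup values) PySem.Set.empty PySem.Set.empty

-- ===== PRECONDITION & SPEC =====
def Spec_needs_normalization_py (values : List String) (out : Bool) : Prop := out = needs_normalization_py_alt values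
instance (values : List String) (out : Bool) : Decidable (Spec_needs_normalization_py values out) := by unfold Spec_needs_normalization_py; infer_instance

-- ===== CLAIM (what is proved, stated in full; the proofs are below) =====
def Claim_equal_needs_normalization_py : Prop := ∀ (values : List String), Dom_needs_normalization_py values → Spec_needs_normalization_py values (needs_normalization_py values)

-- ===== LEMMAS AND PROOFS =====

-- length of set(ys) = length of Mathlib's dedup of ys (both count the distinct elements)
lemma length_ofList_eq_dedup (ys : List String) :
    (PySem.Set.ofList ys).length = ys.dedup.length := by
  have h1 : (PySem.Set.ofList ys).toFinset.card = (PySem.Set.ofList ys).length :=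
    List.toFinset_card_of_nodup (PySem.Set.nodup_ofList ys)
  have h2 : (PySem.Set.ofList ys).toFinset = ys.toFinset := by
    ext a; simp [PySem.Set.mem_ofList]
  have h3 : ys.toFinset.card = ys.dedup.length := List.card_toFinset ys
  rw [h2] at h1
  omega

-- A's cardinality test is exactly: f is non-injective on the distinct values
lemma card_lt_iff (values : List String) (f : String → String) :
    (PySem.Set.ofList (values.map f)).length < (PySem.Set.ofList values).length ↔
      ¬ ((PySem.Set.ofList values).map f).Nodup := by
  set d := PySem.Set.ofList values with hd
  have hdnd : d.Nodup := PySem.Set.nodup_ofList values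
  -- set(values.map f) and set(d.map f) have the same length (same members, both nodup)
  have hsame : (PySem.Set.ofList (values.map f)).length = (PySem.Set.ofList (d.map f)).length := by
    refine ((List.perm_ext_iff_of_nodup (PySem.Set.nodup_ofList _) (PySem.Set.nodup_ofList _)).2 ?_).length_eq
    intro a; simp [PySem.Set.mem_ofList, hd]
  have hle : (PySem.Set.ofList (d.map f)).length ≤ (d.map f).length :=
    PySem.Set.length_ofList_le _
  have hmaplen : (d.map f).length = d.length := List.length_map ..
  constructor
  · intro hlt hnd
    rw [hsame, PySem.Set.ofList_eq_self_of_nodup _ hnd, hmaplen] at hlt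
    omega
  · intro hnd
    rw [hsame]
    have h1 : (PySem.Set.ofList (d.map f)).length = (d.map f).dedup.length :=
      length_ofList_eq_dedup _
    have h2 : (d.map f).dedup.length < (d.map f).length := by
      refine Nat.lt_of_le_of_ne (List.Sublist.length_le (List.dedup_sublist _)) ?_
      intro heq
      have heq' : (d.map f).dedup = d.map f := (List.dedup_sublist _).eq_of_length heq
      exact hnd (heq' ▸ List.nodup_dedup (d.map f))
    omega

-- the B loop returns false iff neither map collides, relative to the seen-sets
lemma nnLoop_false_iff (d : List String) :
    ∀ (seenL seenS : List String),
      (nnLoop d seenL seenS = false ↔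
        (((d.map PySem.Str.lower).Nodup ∧ ∀ x ∈ d.map PySem.Str.lower, x ∉ seenL) ∧
         ((d.map PySem.Str.strip).Nodup ∧ ∀ x ∈ d.map PySem.Str.strip, x ∉ seenS))) := by
  induction d with
  | nil => intro seenL seenS; simp [nnLoop]
  | cons v rest ih =>
    intro seenL seenS
    simp only [nnLoop, List.map_cons, List.nodup_cons, List.mem_cons]
    by_cases hvL : PySem.Str.lower v ∈ seenL
    · simp [hvL]
    · by_cases hvS : PySem.Str.strip v ∈ seenS
      · simp [hvS]
      · have hcond : (PySem.Set.contains seenL (PySem.Str.lower v) ||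
            PySem.Set.contains seenS (PySem.Str.strip v)) = false := by
          simp [hvL, hvS]
        rw [hcond]
        simp only [Bool.false_eq_true, if_false, ih]
        constructor
        · rintro ⟨⟨hL1, hL2⟩, hS1, hS2⟩
          refine ⟨⟨⟨?_, hL1⟩, ?_⟩, ⟨?_, hS1⟩, ?_⟩
          · intro hmem
            exact (hL2 _ hmem) (by simp [PySem.Set.mem_add])
          · rintro x (rfl | hx)
            · exact hvL
            · intro hxs; exact (hL2 x hx) (by simp [PySem.Set.mem_add, hxs])
          · intro hmem
            exact (hS2 _ hmem) (by simp [PySem.Set.mem_add])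
          · rintro x (rfl | hx)
            · exact hvS
            · intro hxs; exact (hS2 x hx) (by simp [PySem.Set.mem_add, hxs])
        · rintro ⟨⟨⟨hL0, hL1⟩, hL2⟩, ⟨hS0, hS1⟩, hS2⟩
          refine ⟨⟨hL1, ?_⟩, hS1, ?_⟩
          · intro x hx hmem
            rcases (PySem.Set.mem_add _ _ _).1 hmem with h | h
            · exact hL2 x (Or.inr hx) h
            · exact hL0 (h ▸ hx)
          · intro x hx hmem
            rcases (PySem.Set.mem_add _ _ _).1 hmem with h | h
            · exact hS2 x (Or.inr hx) h
            · exact hS0 (h ▸ hx)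

lemma alt_false_iff (values : List String) :
    needs_normalization_py_alt values = false ↔
      (values.length < 2 ∨
        (((PySem.Set.ofList values).map PySem.Str.lower).Nodup ∧
         ((PySem.Set.ofList values).map PySem.Str.strip).Nodup)) := by
  unfold needs_normalization_py_alt
  by_cases hlen : values.length < 2
  · rw [if_pos hlen]
    exact ⟨fun _ => Or.inl hlen, fun _ => rfl⟩
  · rw [if_neg hlen, PySem.List.dedup_eq_ofList, nnLoop_false_iff]
    constructor
    · rintro ⟨⟨hL, _⟩, hS, _⟩
      exact Or.inr ⟨hL, hS⟩
    · rintro (h | ⟨hL, hS⟩)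
      · exact absurd h hlen
      · exact ⟨⟨hL, by simp [PySem.Set.empty]⟩, hS, by simp [PySem.Set.empty]⟩

lemma a_false_iff (values : List String) :
    needs_normalization_py values = false ↔
      (values.length < 2 ∨
        (((PySem.Set.ofList values).map PySem.Str.lower).Nodup ∧
         ((PySem.Set.ofList values).map PySem.Str.strip).Nodup)) := by
  have hc1 : (PySem.Set.len (PySem.Set.ofList (values.map PySem.Str.lower)) <
        PySem.Set.len (PySem.Set.ofList values)) ↔
      ¬ ((PySem.Set.ofList values).map PySem.Str.lower).Nodup := by
    simp only [PySem.Set.len, Nat.cast_lt]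
    exact card_lt_iff values PySem.Str.lower
  have hc2 : (PySem.Set.len (PySem.Set.ofList (values.map PySem.Str.strip)) <
        PySem.Set.len (PySem.Set.ofList values)) ↔
      ¬ ((PySem.Set.ofList values).map PySem.Str.strip).Nodup := by
    simp only [PySem.Set.len, Nat.cast_lt]
    exact card_lt_iff values PySem.Str.strip
  simp only [needs_normalization_py]
  by_cases hlen : values.length < 2
  · rw [if_pos hlen]
    exact ⟨fun _ => Or.inl hlen, fun _ => rfl⟩
  · rw [if_neg hlen]
    constructor
    · intro hfalse
      split_ifs at hfalse with h1 h2
      exact Or.inr ⟨not_not.1 (fun hn => h1 (hc1.2 hn)), not_not.1 (fun hn => h2 (hc2.2 hn))⟩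
    · rintro (h | ⟨hL, hS⟩)
      · exact absurd h hlen
      · rw [if_neg (fun hc => (hc1.1 hc) hL), if_neg (fun hc => (hc2.1 hc) hS)]

-- ===== VERDICT (by name: the statement is the Claim_ definition above) =====
theorem needs_normalization_py_spec : Claim_equal_needs_normalization_py := by
  intro values _
  unfold Spec_needs_normalization_py
  cases hB : needs_normalization_py_alt values with
  | false => exact (a_false_iff values).2 ((alt_false_iff values).1 hB)
  | true =>
    cases hA : needs_normalization_py values with
    | false =>
      rw [(alt_false_iff values).2 ((a_false_iff values).1 hA)] at hB
      exact absurd hB (by simp)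
    | true => rfl
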